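-- pv_equiv track=rewrite | github.com/TheDukeVin/AMP | dinner/staff/dinner.py | filter_bad_invites
-- ===== SOURCE A (Python) =====
-- def find_dislikes(friends: dict)->set[tuple]:
--     """Given a dictionary-based adjacency list of String-based nodes,
--        returns a set of all edges in the graph (ie. dislikes who can't be invited together).
--
--        An edge should only appear once in the list.
--
--        Example
--        -------
--        >>>friends={
--            'Alice':['Bob'],
--            'Bob':['Alice', 'Eve'],
--            'Eve':['Bob']
--        }
--        >>>find_dislikes(friends)
--        [['Alice','Bob'],['Bob','Eve']]
--
--     """
--     edges = set()
--     for edge in friends.items():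
--         for node in edge[1]:
--             new_edge=tuple(sorted([edge[0], node]))
--             edges.add(tuple(sorted(new_edge)))
--
--     return edges
--
-- def filter_bad_invites(all_subsets:list, friends:dict)-> list:
--     '''Removes subsets from all_subsets that contain any pair of friends who
--        are in a dislike relationship
--
--        Example
--        -------
--        >>>all_subsets = [[], ['Eve'], ['Bob'], ['Bob', 'Eve'], ['Alice'], ['Alice', 'Eve'], ['Alice', 'Bob'], ['Alice', 'Bob', 'Eve']]
--        >>>friends={
--         'Alice':['Bob'],
--         'Bob':['Alice'],
--         'Eve':[]
--        }
--        >>>filter_bad_invites(all_subsets, friends)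
--        [[], ['Eve'], ['Bob'], ['Bob', 'Eve'], ['Alice'], ['Alice', 'Eve']]
--     '''
--     good_invites = []
--
--     dislike_pairs = find_dislikes(friends)
--
--     for subset in all_subsets:
--         good = True
--         for dislike in dislike_pairs:
--             if dislike[0] in subset and dislike[1] in subset:
--                 good = False
--         if good:
--             good_invites.append(subset)
--
--     return good_invites
-- ===== SOURCE B (Python) =====
-- def filter_bad_invites(all_subsets: list, friends: dict) -> list:
--     good_invites = []
--     for subset in all_subsets:
--         members = set(subset)
--         bad = False
--         for p in subset:
--             for q in friends.get(p, []):
--                 if q in members: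
--                     bad = True
--                     break
--             if bad:
--                 break
--         if not bad:
--             good_invites.append(subset)
--     return good_invites
-- ===== Notes on version B (the rewrite author's own statement) =====
-- stated objective: faster
-- what changed: B drops the find_dislikes edge-set precomputation entirely: per subset it builds a member set and scans friends.get(p, []) for each member p, marking the subset bad and breaking on the first disliked neighbour found, instead of testing every precomputed dislike pair against every subset without early exit.
import Mathlib
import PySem

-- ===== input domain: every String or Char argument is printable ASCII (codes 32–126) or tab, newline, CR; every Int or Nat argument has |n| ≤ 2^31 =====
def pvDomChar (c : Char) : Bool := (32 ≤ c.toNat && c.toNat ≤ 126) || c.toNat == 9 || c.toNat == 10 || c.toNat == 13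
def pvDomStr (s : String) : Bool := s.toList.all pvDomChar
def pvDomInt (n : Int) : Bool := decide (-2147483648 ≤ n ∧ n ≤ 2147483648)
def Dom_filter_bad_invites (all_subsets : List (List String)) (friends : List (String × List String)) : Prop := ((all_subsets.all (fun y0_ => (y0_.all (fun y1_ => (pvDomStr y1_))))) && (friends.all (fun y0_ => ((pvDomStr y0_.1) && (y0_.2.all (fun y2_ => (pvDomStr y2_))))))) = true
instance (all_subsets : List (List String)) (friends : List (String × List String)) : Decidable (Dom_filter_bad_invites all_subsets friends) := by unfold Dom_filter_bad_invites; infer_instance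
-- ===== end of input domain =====

-- B replaces A's precomputed dislike-pair set by a per-subset scan of the adjacency dict
-- with early exit (objective: faster by a constant-factor mechanism, measured in a timing run).

-- ===== PORT A =====
-- tuple(sorted([a, b])) for two strings: stable 2-element insertion sort gives (b, a) iff b < a.
def pvSortPair (a b : String) : String × String := if b < a then (b, a) else (a, b)

-- find_dislikes: for edge in friends.items(): for node in edge[1]: edges.add(tuple(sorted(...)))
def find_dislikes (friends : List (String × List String)) : PySem.Set (String × String) :=
  (PySem.Dict.ofList friends).items.foldl
    (fun edges edge =>
      edge.2.foldl (fun edges node => PySem.Set.add edges (pvSortPair edge.1 node)) edges)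
    PySem.Set.empty

-- A iterates the Python set dislike_pairs; the flag 'good' only records whether ANY pair hits,
-- so the result does not depend on the set's iteration order.
def filter_bad_invites (all_subsets : List (List String)) (friends : List (String × List String)) : List (List String) :=
  let dislike_pairs := find_dislikes friends
  all_subsets.foldl
    (fun good_invites subset =>
      let good := dislike_pairs.foldl
        (fun good dislike =>
          if subset.contains dislike.1 && subset.contains dislike.2 then false else good)
        true
      if good then good_invites ++ [subset] else good_invites)
    []

-- ===== PORT B =====
-- inner loop: for q in friends.get(p, []): if q in members: bad = True; break
def fbiAltHitsMember (members : PySem.Set String) : List String → Bool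
  | [] => false
  | q :: rest => if PySem.Set.contains members q then true else fbiAltHitsMember members rest

-- outer loop over the subset's members, breaking as soon as bad becomes True
def fbiAltBad (friends : PySem.Dict String (List String)) (members : PySem.Set String) : List String → Bool
  | [] => false
  | p :: rest =>
      if fbiAltHitsMember members (friends.getD p []) then true
      else fbiAltBad friends members rest

def filter_bad_invites_alt (all_subsets : List (List String)) (friends : List (String × List String)) : List (List String) :=
  let fd := PySem.Dict.ofList friends
  all_subsets.foldl
    (fun good_invites subset =>
      if fbiAltBad fd (PySem.Set.ofList subset) subset then good_invites
      else good_invites ++ [subset])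
    []

-- ===== PRECONDITION & SPEC =====
def Spec_filter_bad_invites (all_subsets : List (List String)) (friends : List (String × List String)) (out : List (List String)) : Prop := out = filter_bad_invites_alt all_subsets friends
instance (all_subsets : List (List String)) (friends : List (String × List String)) (out : List (List String)) : Decidable (Spec_filter_bad_invites all_subsets friends out) := by unfold Spec_filter_bad_invites; infer_instance

-- ===== CLAIM (what is proved, stated in full; the proofs are below) =====
def Claim_equal_filter_bad_invites : Prop := ∀ (all_subsets : List (List String)) (friends : List (String × List String)), Dom_filter_bad_invites all_subsets friends → Spec_filter_bad_invites all_subsets friends (filter_bad_invites all_subsets friends)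

-- ===== LEMMAS AND PROOFS =====

-- A's inner flag loop is an 'all' over the edge set
lemma foldl_flag_eq_all (l : List (String × String)) (P : String × String → Bool) (b : Bool) :
    l.foldl (fun good e => if P e then false else good) b = (b && l.all (fun e => !P e)) := by
  induction l generalizing b with
  | nil => simp
  | cons e t ih =>
      simp only [List.foldl_cons, List.all_cons, ih]
      by_cases h : P e = true
      · simp [h]
      · simp [h]

-- membership in the inner edge-adding fold
lemma mem_inner_fold (k : String) (ns : List String) (s : PySem.Set (String × String))
    (x : String × String) :
    x ∈ ns.foldl (fun s n => PySem.Set.add s (pvSortPair k n)) s ↔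
      x ∈ s ∨ ∃ n ∈ ns, x = pvSortPair k n := by
  induction ns generalizing s with
  | nil => simp
  | cons n t ih =>
      simp only [List.foldl_cons, ih, PySem.Set.mem_add, List.mem_cons]
      constructor
      · rintro (⟨h | h⟩ | ⟨m, hm, hx⟩)
        · exact Or.inl h
        · exact Or.inr ⟨n, Or.inl rfl, h⟩
        · exact Or.inr ⟨m, Or.inr hm, hx⟩
      · rintro (h | ⟨m, hm | hm, hx⟩)
        · exact Or.inl (Or.inl h)
        · exact Or.inl (Or.inr (hm ▸ hx))
        · exact Or.inr ⟨m, hm, hx⟩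

-- membership in find_dislikes via the dict's items
lemma mem_find_dislikes (friends : List (String × List String)) (x : String × String) :
    x ∈ find_dislikes friends ↔
      ∃ kn ∈ (PySem.Dict.ofList friends).items, ∃ n ∈ kn.2, x = pvSortPair kn.1 n := by
  unfold find_dislikes
  generalize (PySem.Dict.ofList friends).items = items
  have gen : ∀ (l : List (String × List String)) (s : PySem.Set (String × String)),
      x ∈ l.foldl (fun edges edge =>
          edge.2.foldl (fun edges node => PySem.Set.add edges (pvSortPair edge.1 node)) edges) s ↔
        x ∈ s ∨ ∃ kn ∈ l, ∃ n ∈ kn.2, x = pvSortPair kn.1 n := by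
    intro l
    induction l with
    | nil => simp
    | cons kn t ih =>
        intro s
        simp only [List.foldl_cons, ih, mem_inner_fold, List.mem_cons]
        constructor
        · rintro (⟨h | h⟩ | ⟨m, hm, n, hn, hx⟩)
          · exact Or.inl h
          · obtain ⟨n, hn, hx⟩ := h
            exact Or.inr ⟨kn, Or.inl rfl, n, hn, hx⟩
          · exact Or.inr ⟨m, Or.inr hm, n, hn, hx⟩
        · rintro (h | ⟨m, hm | hm, n, hn, hx⟩)
          · exact Or.inl (Or.inl h)
          · subst hm; exact Or.inl (Or.inr ⟨n, hn, hx⟩)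
          · exact Or.inr ⟨m, hm, n, hn, hx⟩
  simpa using gen items PySem.Set.empty

-- B's inner break loop is an 'any'
lemma hitsMember_eq_any (members : PySem.Set String) (qs : List String) :
    fbiAltHitsMember members qs = qs.any (fun q => PySem.Set.contains members q) := by
  induction qs with
  | nil => rfl
  | cons q t ih =>
      simp only [fbiAltHitsMember, List.any_cons, ih]
      by_cases h : PySem.Set.contains members q = true <;> simp [h]

-- B's outer break loop is an 'any'
lemma altBad_eq_any (fd : PySem.Dict String (List String)) (members : PySem.Set String)
    (ps : List String) :
    fbiAltBad fd members ps =
      ps.any (fun p => (fd.getD p []).any (fun q => PySem.Set.contains members q)) := by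
  induction ps with
  | nil => rfl
  | cons p t ih =>
      rw [show fbiAltBad fd members (p :: t) =
            (if fbiAltHitsMember members (fd.getD p []) then true else fbiAltBad fd members t)
          from rfl, hitsMember_eq_any, ih, List.any_cons]
      cases ((fd.getD p []).any fun q => PySem.Set.contains members q) <;> simp

-- the bad conditions, as propositions, coincide
lemma key_iff (friends : List (String × List String)) (subset : List String) :
    (∃ x ∈ find_dislikes friends, x.1 ∈ subset ∧ x.2 ∈ subset) ↔
      ∃ p ∈ subset, ∃ q ∈ (PySem.Dict.ofList friends).getD p [], q ∈ subset := by
  constructor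
  · rintro ⟨x, hx, h1, h2⟩
    obtain ⟨⟨k, ns⟩, hkn, n, hn, rfl⟩ := (mem_find_dislikes friends x).mp hx
    have hget : (PySem.Dict.ofList friends).get? k = some ns :=
      PySem.Dict.get?_of_mem_items _ hkn (PySem.Dict.nodup_keys_ofList friends)
    have hgd : (PySem.Dict.ofList friends).getD k [] = ns := by
      rw [PySem.Dict.getD_eq_get?_getD, hget]; rfl
    simp only [pvSortPair] at h1 h2
    split_ifs at h1 h2
    · exact ⟨k, h2, n, by rw [hgd]; exact hn, h1⟩
    · exact ⟨k, h1, n, by rw [hgd]; exact hn, h2⟩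
  · rintro ⟨p, hp, q, hq, hqs⟩
    rcases hget? : (PySem.Dict.ofList friends).get? p with _ | ns
    · rw [PySem.Dict.getD_eq_get?_getD, hget?] at hq; simp at hq
    · rw [PySem.Dict.getD_eq_get?_getD, hget?] at hq
      simp only [Option.getD_some] at hq
      refine ⟨pvSortPair p q, (mem_find_dislikes friends _).mpr
        ⟨(p, ns), PySem.Dict.mem_items_of_get?_eq_some _ hget?, q, hq, rfl⟩, ?_⟩
      simp only [pvSortPair]
      split_ifs <;> exact ⟨by assumption, by assumption⟩

-- the per-subset condition: A's good flag equals the negation of B's bad flag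
lemma good_eq_not_bad (friends : List (String × List String)) (subset : List String) :
    ((find_dislikes friends).foldl
        (fun good dislike =>
          if subset.contains dislike.1 && subset.contains dislike.2 then false else good)
        true) =
      !(fbiAltBad (PySem.Dict.ofList friends) (PySem.Set.ofList subset) subset) := by
  rw [foldl_flag_eq_all, altBad_eq_any, Bool.true_and]
  have hall : (find_dislikes friends).all
        (fun e => !(subset.contains e.1 && subset.contains e.2)) =
      !((find_dislikes friends).any (fun e => subset.contains e.1 && subset.contains e.2)) := by
    simp [List.all_eq_not_any_not]
  rw [hall]
  congr 1
  rw [Bool.eq_iff_iff]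
  simp only [List.any_eq_true, Bool.and_eq_true, List.contains_iff_mem,
    PySem.Set.contains_eq_listContains, PySem.Set.mem_ofList]
  exact key_iff friends subset

-- the outer filter loops agree
lemma outer_fold_eq (all_subsets : List (List String)) (friends : List (String × List String))
    (acc : List (List String)) :
    all_subsets.foldl
      (fun good_invites subset =>
        let good := (find_dislikes friends).foldl
          (fun good dislike =>
            if subset.contains dislike.1 && subset.contains dislike.2 then false else good)
          true
        if good then good_invites ++ [subset] else good_invites)
      acc =
    all_subsets.foldl
      (fun good_invites subset =>
        if fbiAltBad (PySem.Dict.ofList friends) (PySem.Set.ofList subset) subset then good_invites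
        else good_invites ++ [subset])
      acc := by
  induction all_subsets generalizing acc with
  | nil => rfl
  | cons s t ih =>
      rw [List.foldl_cons, List.foldl_cons, ih, good_eq_not_bad]
      cases fbiAltBad (PySem.Dict.ofList friends) (PySem.Set.ofList s) s <;> simp

-- ===== VERDICT (by name: the statement is the Claim_ definition above) =====
theorem filter_bad_invites_spec : Claim_equal_filter_bad_invites := by
  intro all_subsets friends _
  unfold Spec_filter_bad_invites filter_bad_invites filter_bad_invites_alt
  exact outer_fold_eq all_subsets friends []
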